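-- pv_equiv track=rewrite | github.com/chunwangpro/Query-to-Distribution | LPALG.py | dictionary_column_variable
-- ===== SOURCE A (Python) =====
-- def dictionary_column_variable(column_to_interval):
--     # Assign a sequential index to each interval in each column
--     column_to_variable = {}
--     total_intervals = 0
--     column_variable_number = []
--     for k, v in column_to_interval.items():
--         count = len(v)
--         column_to_variable[k] = [total_intervals + i for i in range(count)]
--         total_intervals += count
--         column_variable_number.append(count)
--     return total_intervals, column_variable_number, column_to_variable
-- ===== SOURCE B (Python) =====
-- from itertools import accumulate
--
-- def dictionary_column_variable(column_to_interval):
--     # Prefix-sum decomposition: counts first, then offsets, then assemble.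
--     column_variable_number = [len(v) for v in column_to_interval.values()]
--     offsets = list(accumulate(column_variable_number, initial=0))
--     total_intervals = offsets.pop()
--     column_to_variable = {
--         k: list(range(off, off + c))
--         for k, off, c in zip(column_to_interval.keys(), offsets, column_variable_number)
--     }
--     return total_intervals, column_variable_number, column_to_variable
-- ===== Notes on version B (the rewrite author's own statement) =====
-- stated objective: alternative
-- what changed: Replaced the single stateful loop (dict + running total + counts accumulated together) by a three-stage prefix-sum assembly: map to counts, itertools.accumulate for offsets/total, then zip keys with offsets to build the index lists.
import Mathlib
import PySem

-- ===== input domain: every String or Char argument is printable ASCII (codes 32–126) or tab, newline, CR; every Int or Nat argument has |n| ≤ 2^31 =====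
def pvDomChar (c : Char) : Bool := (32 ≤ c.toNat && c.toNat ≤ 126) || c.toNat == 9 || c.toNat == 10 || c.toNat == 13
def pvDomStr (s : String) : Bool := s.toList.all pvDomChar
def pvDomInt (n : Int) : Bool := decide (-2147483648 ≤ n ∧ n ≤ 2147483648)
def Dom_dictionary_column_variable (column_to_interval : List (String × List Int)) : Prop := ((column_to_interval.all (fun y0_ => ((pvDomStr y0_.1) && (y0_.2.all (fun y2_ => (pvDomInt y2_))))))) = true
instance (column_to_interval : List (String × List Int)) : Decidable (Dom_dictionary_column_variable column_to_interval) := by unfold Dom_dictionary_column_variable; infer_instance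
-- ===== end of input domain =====

-- B re-implements A by a prefix-sum decomposition (counts, then accumulated offsets, then
-- zip-assembled index lists) instead of A's single loop with running state; same cost, alternative structure.

-- ===== PORT A =====
-- loop body of A: state is (column_to_variable, total_intervals, column_variable_number)
def pvAStep (st : PySem.Dict String (List Int) × Int × List Int) (kv : String × List Int) :
    PySem.Dict String (List Int) × Int × List Int :=
  let count : Int := (kv.2.length : Int)
  (st.1.insert kv.1 ((PySem.List.pyRange 0 count 1).map (fun i => st.2.1 + i)),
   st.2.1 + count, st.2.2 ++ [count])

def dictionary_column_variable (column_to_interval : List (String × List Int)) :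
    Int × List Int × (List (String × List Int)) :=
  let st := column_to_interval.foldl pvAStep (PySem.Dict.empty, 0, [])
  (st.2.1, st.2.2, st.1.items)

-- ===== PORT B =====
-- dict-comprehension body of B: insert k ↦ list(range(off, off+c))
def pvBStep (d : PySem.Dict String (List Int)) (t : String × Int × Int) :
    PySem.Dict String (List Int) :=
  d.insert t.1 (PySem.List.pyRange t.2.1 (t.2.1 + t.2.2) 1)

def dictionary_column_variable_alt (column_to_interval : List (String × List Int)) :
    Int × List Int × (List (String × List Int)) :=
  let column_variable_number : List Int := column_to_interval.map (fun kv => (kv.2.length : Int))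
  let acc : List Int := column_variable_number.scanl (· + ·) 0   -- accumulate(counts, initial=0)
  let total_intervals : Int := acc.getLast!                      -- offsets.pop()
  let offsets : List Int := acc.dropLast
  let d := ((column_to_interval.map Prod.fst).zip (offsets.zip column_variable_number)).foldl
    pvBStep PySem.Dict.empty
  (total_intervals, column_variable_number, d.items)

-- ===== PRECONDITION & SPEC =====
def Spec_dictionary_column_variable (column_to_interval : List (String × List Int)) (out : Int × List Int × (List (String × List Int))) : Prop := out = dictionary_column_variable_alt column_to_interval
instance (column_to_interval : List (String × List Int)) (out : Int × List Int × (List (String × List Int))) : Decidable (Spec_dictionary_column_variable column_to_interval out) := by unfold Spec_dictionary_column_variable; infer_instance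

-- ===== CLAIM (what is proved, stated in full; the proofs are below) =====
def Claim_equal_dictionary_column_variable : Prop := ∀ (column_to_interval : List (String × List Int)), Dom_dictionary_column_variable column_to_interval → Spec_dictionary_column_variable column_to_interval (dictionary_column_variable column_to_interval)

-- ===== LEMMAS AND PROOFS =====

-- A's per-iteration index list equals B's range at the running offset.
lemma pvRange_shift (t c : Int) :
    (PySem.List.pyRange 0 c 1).map (fun i => t + i) = PySem.List.pyRange t (t + c) 1 := by
  simp [PySem.List.pyRange_one, List.map_map, Function.comp]

lemma pvScanl_ne_nil (l : List Int) (t : Int) : l.scanl (· + ·) t ≠ [] := by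
  cases l <;> simp [List.scanl]

lemma pvScanl_getLast? (l : List Int) (t : Int) :
    (l.scanl (· + ·) t).getLast?.getD 0 = t + l.sum := by
  induction l generalizing t with
  | nil => simp [List.scanl]
  | cons c rest ih =>
      rw [List.scanl_cons]
      obtain ⟨x, xs, hx⟩ := List.exists_cons_of_ne_nil (pvScanl_ne_nil rest (t + c))
      rw [hx, List.getLast?_cons_cons, ← hx, ih]; simp; ring

-- main invariant: A's loop from state (d, t, cvn) equals B's assembly shifted by t.
lemma pvMain (cti : List (String × List Int)) (d : PySem.Dict String (List Int))
    (t : Int) (cvn : List Int) :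
    cti.foldl pvAStep (d, t, cvn) =
      ((((cti.map Prod.fst).zip
          ((((cti.map (fun kv => (kv.2.length : Int))).scanl (· + ·) t).dropLast).zip
            (cti.map (fun kv => (kv.2.length : Int))))).foldl pvBStep d),
        t + (cti.map (fun kv => (kv.2.length : Int))).sum,
        cvn ++ cti.map (fun kv => (kv.2.length : Int))) := by
  induction cti generalizing d t cvn with
  | nil => simp
  | cons kv rest ih =>
      simp only [List.map_cons, List.scanl_cons, List.foldl_cons, List.sum_cons]
      rw [List.dropLast_cons_of_ne_nil (pvScanl_ne_nil _ _)]
      simp only [List.zip_cons_cons]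
      rw [List.foldl_cons]
      have hstep : pvAStep (d, t, cvn) kv =
          (pvBStep d (kv.1, t, (kv.2.length : Int)), t + (kv.2.length : Int),
            cvn ++ [(kv.2.length : Int)]) := by
        simp [pvAStep, pvBStep, pvRange_shift]
      rw [hstep, ih]
      simp [List.append_assoc]; ring

-- ===== VERDICT (by name: the statement is the Claim_ definition above) =====
theorem dictionary_column_variable_spec : Claim_equal_dictionary_column_variable := by
  intro cti _
  unfold Spec_dictionary_column_variable dictionary_column_variable dictionary_column_variable_alt
  rw [pvMain]
  simp [pvScanl_getLast?]
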